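-- pv_equiv track=rewrite | github.com/greybrunix/LAII | 1st_tourney/notes.py | cruzamentos
-- ===== SOURCE A (Python) =====
-- def cruzamentos(ruas):
--     res = dict();
--     for street in ruas:
--         if not street[0] in res:
--             res[street[0]] = 1;
--         else: res[street[0]] += 1;
--         if not street[-1] in res:
--             res[street[-1]] = 1;
--         else:
--             if street[0] != street[-1]:
--                 res[street[-1]] += 1;
--     return sorted(sorted(res.items()),key= lambda x : x[1]);
-- ===== SOURCE B (Python) =====
-- def cruzamentos(ruas):
--     # Sort-then-run-length-encode: flatten the streets into an endpoint list
--     # (a self-loop street contributes its endpoint once), sort it, and read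
--     # each count off as the length of a run of equal elements; no counting
--     # container is ever built.
--     ends = []
--     for street in ruas:
--         ends.append(street[0])
--         if street[-1] != street[0]:
--             ends.append(street[-1])
--     ends.sort()
--     pares = []
--     if ends:
--         cur = ends[0]
--         cnt = 1
--         for y in ends[1:]:
--             if y == cur:
--                 cnt += 1
--             else:
--                 pares.append((cur, cnt))
--                 cur, cnt = y, 1
--         pares.append((cur, cnt))
--     pares.sort(key=lambda x: x[1])
--     return pares
-- ===== Notes on version B (the rewrite author's own statement) =====
-- stated objective: alternative
-- what changed: B never builds a counting container: it flattens the streets into a plain endpoint list (one entry per distinct endpoint of each street), sorts that list, and reads each endpoint's count off as the length of a run of equal adjacent elements, then stably sorts the (key, run-length) pairs by count; A maintains a dict of counts updated street by street.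
import Mathlib
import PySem

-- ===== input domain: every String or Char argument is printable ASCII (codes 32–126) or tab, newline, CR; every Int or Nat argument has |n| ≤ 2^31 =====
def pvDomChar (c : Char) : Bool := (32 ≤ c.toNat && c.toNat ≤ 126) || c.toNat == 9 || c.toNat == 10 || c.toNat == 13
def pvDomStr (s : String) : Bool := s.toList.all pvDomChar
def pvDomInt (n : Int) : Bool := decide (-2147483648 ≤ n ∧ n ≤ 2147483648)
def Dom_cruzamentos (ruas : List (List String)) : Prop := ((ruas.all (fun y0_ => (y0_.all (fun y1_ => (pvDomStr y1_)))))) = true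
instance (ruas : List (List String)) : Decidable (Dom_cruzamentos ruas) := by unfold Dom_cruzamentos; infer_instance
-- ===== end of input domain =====

-- B never builds a counting container: it sorts the flattened endpoint list and
-- reads counts off as run lengths, instead of A's incrementally-maintained dict
-- (alternative algorithm, similar cost).


-- ===== PORT A =====
-- literal port of A: a dict of endpoint counts built street by street
-- (street[0] / street[-1] are total here with default ""; Pre_ restricts to
-- nonempty streets, where Python's indexing returns)
def cruzamentos (ruas : List (List String)) : List (String × Int) :=
  let res : PySem.Dict String Int :=
    ruas.foldl (fun res street =>
      let s0 := PySem.List.pyGetD street 0 ""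
      let s1 := PySem.List.pyGetD street (-1) ""
      let res := if res.contains s0 = false then res.insert s0 1
                 else res.insert s0 (res.getD s0 0 + 1)
      if res.contains s1 = false then res.insert s1 1
      else if s0 ≠ s1 then res.insert s1 (res.getD s1 0 + 1)
      else res) PySem.Dict.empty
  PySem.List.sorted (PySem.List.sorted2 res.items Prod.fst Prod.snd false)
    (fun x => x.2) false

-- ===== PORT B =====
-- literal port of Source B: the inner for-loop over ends[1:] carrying (cur, cnt)
def pvRleGo (cur : String) (cnt : Int) (pares : List (String × Int)) :
    List String → List (String × Int)
  | [] => pares ++ [(cur, cnt)]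
  | y :: ys =>
    if y = cur then pvRleGo cur (cnt + 1) pares ys
    else pvRleGo y 1 (pares ++ [(cur, cnt)]) ys

def cruzamentos_alt (ruas : List (List String)) : List (String × Int) :=
  let ends : List String :=
    ruas.foldl (fun ends street =>
      let a := PySem.List.pyGetD street 0 ""
      let b := PySem.List.pyGetD street (-1) ""
      let ends := ends ++ [a]
      if b ≠ a then ends ++ [b] else ends) []
  let sends := PySem.List.sorted ends (fun x => x) false
  let pares : List (String × Int) :=
    match sends with
    | [] => []
    | x :: xs => pvRleGo x 1 [] xs
  PySem.List.sorted pares (fun x => x.2) false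

-- ===== PRECONDITION & SPEC =====
-- Pre_: every street is nonempty — on an empty street Python A raises IndexError.
def Pre_cruzamentos (ruas : List (List String)) : Prop := ∀ s ∈ ruas, s ≠ []
instance (ruas : List (List String)) : Decidable (Pre_cruzamentos ruas) := by unfold Pre_cruzamentos; infer_instance
def pvWitness_cruzamentos : List (List String) := [["a", "b"], ["b", "c", "b"], ["a"]]
def Spec_cruzamentos (ruas : List (List String)) (out : List (String × Int)) : Prop := out = cruzamentos_alt ruas
instance (ruas : List (List String)) (out : List (String × Int)) : Decidable (Spec_cruzamentos ruas out) := by unfold Spec_cruzamentos; infer_instance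

-- ===== CLAIM (what is proved, stated in full; the proofs are below) =====
def Claim_equal_cruzamentos : Prop := ∀ (ruas : List (List String)), Dom_cruzamentos ruas → Pre_cruzamentos ruas → Spec_cruzamentos ruas (cruzamentos ruas)

-- ===== LEMMAS AND PROOFS =====

-- the (deduplicated) endpoints a street contributes
def pvEp (street : List String) : List String :=
  let a := PySem.List.pyGetD street 0 ""
  let b := PySem.List.pyGetD street (-1) ""
  if b = a then [a] else [a, b]

-- B's endpoint accumulation is extend-by-pvEp
lemma ends_eq_flatMap (ruas : List (List String)) :
    ruas.foldl (fun ends street =>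
      let a := PySem.List.pyGetD street 0 ""
      let b := PySem.List.pyGetD street (-1) ""
      let ends := ends ++ [a]
      if b ≠ a then ends ++ [b] else ends) [] = ruas.flatMap pvEp := by
  have h : ∀ (acc : List String),
      ruas.foldl (fun ends street =>
        let a := PySem.List.pyGetD street 0 ""
        let b := PySem.List.pyGetD street (-1) ""
        let ends := ends ++ [a]
        if b ≠ a then ends ++ [b] else ends) acc = acc ++ ruas.flatMap pvEp := by
    induction ruas with
    | nil => intro acc; simp
    | cons s t ih =>
      intro acc
      simp only [List.foldl_cons, List.flatMap_cons, ih]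
      unfold pvEp
      by_cases hb : PySem.List.pyGetD s (-1) "" = PySem.List.pyGetD s 0 ""
      · simp [hb]
      · simp [hb, List.append_assoc]
  simpa using h []

-- one street-step of A's dict loop is the counter step folded over the
-- street's distinct endpoints
lemma streetStep_eq (d : PySem.Dict String Int) (a b : String) :
    (let res := if d.contains a = false then d.insert a 1
                else d.insert a (d.getD a 0 + 1)
     if res.contains b = false then res.insert b 1
     else if a ≠ b then res.insert b (res.getD b 0 + 1)
     else res) =
    (if b = a then [a] else [a, b]).foldl
      (fun d x => d.insert x (d.getD x 0 + 1)) d := by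
  have step1 : ∀ (d : PySem.Dict String Int) (k : String),
      (if d.contains k = false then d.insert k 1
       else d.insert k (d.getD k 0 + 1)) = d.insert k (d.getD k 0 + 1) := by
    intro d k
    by_cases h : d.contains k = false
    · rw [if_pos h, PySem.Dict.getD_of_not_contains d 0 h]; norm_num
    · rw [if_neg h]
  simp only [step1]
  by_cases h : b = a
  · subst h
    have hc : (d.insert b (d.getD b 0 + 1)).contains b = true :=
      PySem.Dict.contains_insert_self d b _
    simp [hc]
  · have hne : a ≠ b := fun e => h e.symm
    simp only [if_neg h, List.foldl_cons, List.foldl_nil]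
    by_cases hc : (d.insert a (d.getD a 0 + 1)).contains b = false
    · rw [if_pos hc, PySem.Dict.getD_of_not_contains _ 0 hc]; norm_num
    · rw [if_neg hc, if_pos hne]

-- A's whole dict loop is Counter(ends)
lemma dict_eq_counter (ruas : List (List String)) :
    ruas.foldl (fun res street =>
      let s0 := PySem.List.pyGetD street 0 ""
      let s1 := PySem.List.pyGetD street (-1) ""
      let res := if res.contains s0 = false then res.insert s0 1
                 else res.insert s0 (res.getD s0 0 + 1)
      if res.contains s1 = false then res.insert s1 1
      else if s0 ≠ s1 then res.insert s1 (res.getD s1 0 + 1)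
      else res) PySem.Dict.empty
    = PySem.Dict.counter (ruas.flatMap pvEp) := by
  rw [← PySem.Dict.foldl_insert_getD_add_one_eq_counter]
  have h : ∀ (d : PySem.Dict String Int),
      ruas.foldl (fun res street =>
        let s0 := PySem.List.pyGetD street 0 ""
        let s1 := PySem.List.pyGetD street (-1) ""
        let res := if res.contains s0 = false then res.insert s0 1
                   else res.insert s0 (res.getD s0 0 + 1)
        if res.contains s1 = false then res.insert s1 1
        else if s0 ≠ s1 then res.insert s1 (res.getD s1 0 + 1)
        else res) d
      = (ruas.flatMap pvEp).foldl (fun d x => d.insert x (d.getD x 0 + 1)) d := by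
    induction ruas with
    | nil => intro d; simp
    | cons s t ih =>
      intro d
      simp only [List.foldl_cons, List.flatMap_cons, List.foldl_append]
      rw [streetStep_eq d (PySem.List.pyGetD s 0 "") (PySem.List.pyGetD s (-1) "")]
      rw [ih]
      unfold pvEp
      rfl
  exact h _

-- insertBy only looks at 'before' on the inserted element vs list members
lemma insertBy_congr {α : Type} (p q : α → α → Bool) (x : α) (l : List α)
    (h : ∀ y ∈ l, p x y = q x y) :
    PySem.List.insertBy p x l = PySem.List.insertBy q x l := by
  induction l with
  | nil => rfl
  | cons y t ih =>
    simp only [PySem.List.insertBy]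
    rw [h y (by simp)]
    by_cases hy : q x y = true
    · simp [hy]
    · simp only [Bool.not_eq_true] at hy
      simp [hy, ih (fun z hz => h z (by simp [hz]))]

-- on pairs with pairwise-distinct first components, Python's tuple sort
-- sorted(pairs) coincides with sorting by the first component
lemma sorted2_eq_sorted_fst (xs : List (String × Int))
    (hnd : (xs.map Prod.fst).Nodup) :
    PySem.List.sorted2 xs Prod.fst Prod.snd false
      = PySem.List.sorted xs (fun x => x.1) false := by
  rw [PySem.List.sorted_eq_foldl_insertBy]
  unfold PySem.List.sorted2
  simp only [if_neg (by decide : ¬ (false = true))]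
  have key : ∀ (l acc : List (String × Int)),
      (∀ a ∈ l, ∀ y ∈ acc, a.1 ≠ y.1) →
      (∀ a ∈ l, ∀ y ∈ l, a ≠ y → a.1 ≠ y.1) → l.Nodup →
      l.foldl (fun acc x =>
        PySem.List.insertBy
          (fun a y => decide (a.1 < y.1) || !decide (y.1 < a.1) && decide (a.2 < y.2)) x acc) acc
      = l.foldl (fun acc x =>
        PySem.List.insertBy (fun a y => decide ((fun x => x.1) a < (fun x => x.1) y)) x acc) acc := by
    intro l
    induction l with
    | nil => intro acc _ _ _; rfl
    | cons x t ih =>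
      intro acc hcross hint hnd
      simp only [List.foldl_cons]
      have hx : PySem.List.insertBy
          (fun a y => decide (a.1 < y.1) || !decide (y.1 < a.1) && decide (a.2 < y.2)) x acc
          = PySem.List.insertBy (fun a y => decide ((fun x => x.1) a < (fun x => x.1) y)) x acc := by
        apply insertBy_congr
        intro y hy
        have hne : x.1 ≠ y.1 := hcross x (by simp) y hy
        rcases lt_or_gt_of_ne hne with hlt | hgt
        · simp [hlt, not_lt_of_gt hlt]
        · have h1 : decide (x.1 < y.1) = false := by
            simp [not_lt_of_gt hgt]
          have h2 : decide (y.1 < x.1) = true := by simp [hgt]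
          rw [h1, h2]; rfl
      rw [hx]
      apply ih
      · intro a ha y hy
        have hy' : y = x ∨ y ∈ acc :=
          (PySem.List.insertBy_mem_iff _ x y acc).mp hy
        rcases hy' with rfl | hy'
        · exact hint a (by simp [ha]) y (by simp)
            (by rintro rfl; exact (List.nodup_cons.mp hnd).1 ha)
        · exact hcross a (by simp [ha]) y hy'
      · intro a ha y hy hay
        exact hint a (by simp [ha]) y (by simp [hy]) hay
      · exact (List.nodup_cons.mp hnd).2
  have hint : ∀ a ∈ xs, ∀ y ∈ xs, a ≠ y → a.1 ≠ y.1 := by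
    intro a ha y hy hay h1
    exact hay (List.inj_on_of_nodup_map hnd ha hy h1)
  exact key xs [] (by simp) hint hnd.of_map

-- the sorted items of Counter(ends) are exactly the (key, count) table over
-- the sorted distinct endpoints
lemma inner_sorted_eq (ends : List String) :
    PySem.List.sorted2 (PySem.Dict.counter ends).items Prod.fst Prod.snd false
      = (PySem.List.sorted (PySem.Set.ofList ends) (fun x => x) false).map
          (fun k => (k, (ends.count k : Int))) := by
  have hkeys : ((PySem.Dict.counter ends).items.map Prod.fst).Nodup := by
    have := PySem.Dict.nodup_keys_counter (κ := String) ends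
    simpa [PySem.Dict.keys] using this
  rw [sorted2_eq_sorted_fst _ hkeys]
  apply PySem.List.sorted_eq_of_perm_of_pairwise_lt
  · rw [PySem.Dict.items_counter]
    exact ((PySem.List.sorted_perm (PySem.Set.ofList ends) (fun x => x) false).map _)
  · have hp := PySem.List.sorted_ofList_pairwise_lt (κ := String) ends
    exact List.Pairwise.map _ (by intro a y hay; simpa using hay) hp

-- the B loop carries its accumulator on the front
lemma pvRleGo_acc (cur : String) (cnt : Int) (pares : List (String × Int))
    (l : List String) :
    pvRleGo cur cnt pares l = pares ++ pvRleGo cur cnt [] l := by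
  induction l generalizing cur cnt pares with
  | nil => simp [pvRleGo]
  | cons y ys ih =>
    by_cases h : y = cur
    · rw [show pvRleGo cur cnt pares (y :: ys) = pvRleGo cur (cnt + 1) pares ys by
        simp [pvRleGo, h]]
      rw [show pvRleGo cur cnt [] (y :: ys) = pvRleGo cur (cnt + 1) [] ys by
        simp [pvRleGo, h]]
      exact ih cur (cnt + 1) pares
    · rw [show pvRleGo cur cnt pares (y :: ys)
            = pvRleGo y 1 (pares ++ [(cur, cnt)]) ys by simp [pvRleGo, h]]
      rw [show pvRleGo cur cnt [] (y :: ys)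
            = pvRleGo y 1 ([] ++ [(cur, cnt)]) ys by simp [pvRleGo, h]]
      rw [ih y 1 (pares ++ [(cur, cnt)]), ih y 1 ([] ++ [(cur, cnt)])]
      simp

-- one run of the B loop: on a sorted tail all ≥ cur, it emits cur with
-- cnt + (number of remaining cur's) and then the runs of the strictly larger rest
lemma pvRleGo_run (cur : String) (cnt : Int) (l : List String)
    (hl : l.Pairwise (· ≤ ·)) (hge : ∀ y ∈ l, cur ≤ y) :
    pvRleGo cur cnt [] l
      = (cur, cnt + (l.count cur : Int)) ::
        (match l.filter (fun y => y ≠ cur) with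
         | [] => []
         | x :: xs => pvRleGo x 1 [] xs) := by
  induction l generalizing cur cnt with
  | nil => simp [pvRleGo]
  | cons y ys ih =>
    rcases List.pairwise_cons.mp hl with ⟨hy, hys⟩
    by_cases h : y = cur
    · subst h
      rw [show pvRleGo y cnt [] (y :: ys) = pvRleGo y (cnt + 1) [] ys by
        simp [pvRleGo]]
      rw [ih y (cnt + 1) hys (fun z hz => hy z hz)]
      have hf : (y :: ys).filter (fun z => z ≠ y) = ys.filter (fun z => z ≠ y) := by
        simp
      rw [hf, List.count_cons_self]
      congr 1
      · congr 1
        push_cast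
        omega
    · have hlt : cur < y := lt_of_le_of_ne (hge y (by simp)) (fun e => h e.symm)
      have hnot : cur ∉ y :: ys := by
        intro hm
        rcases List.mem_cons.mp hm with rfl | hm
        · exact h rfl
        · exact absurd (hy cur hm) (not_le_of_gt hlt)
      have hcount : (y :: ys).count cur = 0 := List.count_eq_zero.mpr hnot
      have hfilter : (y :: ys).filter (fun z => z ≠ cur) = y :: ys := by
        apply List.filter_eq_self.mpr
        intro z hz
        rcases List.mem_cons.mp hz with rfl | hz
        · simp [h]
        · have : cur < z := lt_of_lt_of_le hlt (hy z hz)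
          simp [ne_of_gt this]
      rw [show pvRleGo cur cnt [] (y :: ys) = pvRleGo y 1 ([] ++ [(cur, cnt)]) ys by
        simp [pvRleGo, h]]
      rw [pvRleGo_acc, hcount, hfilter]
      norm_num

-- run-length encoding of a ≤-sorted list is the (key, count) table over any
-- strictly increasing enumeration K of its elements
lemma rle_eq_of (K : List String) : ∀ (s : List String),
    s.Pairwise (· ≤ ·) → K.Pairwise (· < ·) → (∀ x, x ∈ K ↔ x ∈ s) →
    (match s with
     | [] => ([] : List (String × Int))
     | x :: xs => pvRleGo x 1 [] xs)
      = K.map (fun k => (k, (s.count k : Int))) := by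
  induction K with
  | nil =>
    intro s _ _ hm
    cases s with
    | nil => rfl
    | cons x xs => exact absurd ((hm x).mpr (by simp)) (by simp)
  | cons k K' ih =>
    intro s hs hK hm
    cases s with
    | nil => exact absurd ((hm k).mp (by simp)) (by simp)
    | cons x xs =>
      rcases List.pairwise_cons.mp hs with ⟨hx, hxs⟩
      rcases List.pairwise_cons.mp hK with ⟨hk, hK'⟩
      have hxk : x = k := by
        rcases List.mem_cons.mp ((hm x).mpr (by simp)) with rfl | hxK'
        · rfl
        · have h1 : k < x := hk x hxK'
          have h2 : x ≤ k := by
            rcases List.mem_cons.mp ((hm k).mp (by simp)) with rfl | hkxs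
            · rfl
            · exact absurd (hx k hkxs) (not_le_of_gt h1)
          exact absurd h1 (not_lt_of_ge h2)
      subst hxk
      show pvRleGo x 1 [] xs = _
      rw [pvRleGo_run x 1 xs hxs hx]
      have hrest := ih (xs.filter (fun y => y ≠ x))
        (hxs.filter _) hK'
        (by
          intro z
          constructor
          · intro hz
            have hzx : z ≠ x := fun e => by
              subst e
              exact absurd (hk z hz) (lt_irrefl z)
            have hzs : z ∈ x :: xs := (hm z).mp (List.mem_cons_of_mem x hz)
            rcases List.mem_cons.mp hzs with rfl | hzxs
            · exact absurd rfl hzx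
            · exact List.mem_filter.mpr ⟨hzxs, by simpa using hzx⟩
          · intro hz
            rcases List.mem_filter.mp hz with ⟨hzxs, hzx⟩
            have hzK : z ∈ x :: K' := (hm z).mpr (List.mem_cons_of_mem x hzxs)
            rcases List.mem_cons.mp hzK with rfl | h
            · simp at hzx
            · exact h)
      rw [hrest]
      congr 1
      · show (x, 1 + (List.count x xs : Int)) = (x, (List.count x (x :: xs) : Int))
        rw [List.count_cons_self]
        congr 1
        push_cast
        omega
      · apply List.map_congr_left
        intro k' hk'
        have hne : k' ≠ x := fun e => by
          subst e
          exact absurd (hk k' hk') (lt_irrefl k')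
        congr 1
        rw [List.count_filter (by simpa using hne)]
        rw [List.count_cons_of_ne (fun e => hne e.symm)]

-- B's run-length pass over the sorted endpoints is the sorted (key, count) table
lemma rle_eq_table (ends : List String) :
    (match PySem.List.sorted ends (fun x => x) false with
     | [] => ([] : List (String × Int))
     | x :: xs => pvRleGo x 1 [] xs)
      = (PySem.List.sorted (PySem.Set.ofList ends) (fun x => x) false).map
          (fun k => (k, (ends.count k : Int))) := by
  have hperm : (PySem.List.sorted ends (fun x => x) false).Perm ends :=
    PySem.List.sorted_perm ends (fun x => x) false
  have h := rle_eq_of (PySem.List.sorted (PySem.Set.ofList ends) (fun x => x) false)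
    (PySem.List.sorted ends (fun x => x) false)
    (by simpa using PySem.List.sorted_pairwise ends (fun x => x))
    (PySem.List.sorted_ofList_pairwise_lt ends)
    (by
      intro z
      simp [PySem.List.mem_sorted, PySem.Set.mem_ofList, hperm.mem_iff])
  rw [h]
  apply List.map_congr_left
  intro k _
  simp [hperm.count_eq]

-- ===== VERDICT (by name: the statement is the Claim_ definition above) =====
theorem cruzamentos_spec : Claim_equal_cruzamentos := by
  intro ruas _ _
  show cruzamentos ruas = cruzamentos_alt ruas
  simp only [cruzamentos, cruzamentos_alt]
  rw [ends_eq_flatMap, dict_eq_counter, inner_sorted_eq, rle_eq_table]
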